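-- pv_equiv track=rewrite | github.com/ChandruMIT-o/Tournament-of-Strategies-MIT | strategies/multiples_of_2.py | multiples_of_2
-- ===== SOURCE A (Python) =====
-- def multiples_of_2(own, opp):
--
--     def alternating_booleans(length):
--
--       true_block = 1
--       false_block = 2
--       result = []
--       cycle = 0
--
--       while len(result) < length:
--
--         result.extend([False] * (false_block + cycle))
--         result.extend([True] * true_block)
--
--         false_block += 2
--
--       return result[:length]
--     length = len(own)
--
--     return alternating_booleans(length+1)[-1]
-- ===== SOURCE B (Python) =====
-- def multiples_of_2(own, opp):
--     # The pattern is: 2 Falses, True, 4 Falses, True, 6 Falses, True, ...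
--     # so index i holds True exactly when i + 2 is a perfect square.
--     # Find the least r with r*r >= m by counting up (O(sqrt n) vs A's O(n)).
--     m = len(own) + 2
--     r = 0
--     while r * r < m:
--         r += 1
--     return r * r == m
-- ===== Notes on version B (the rewrite author's own statement) =====
-- stated objective: faster
-- what changed: Instead of materialising the alternating False/True block list of length n+1 and taking its last element, B uses the closed-form characterisation that position n is True iff n+2 is a perfect square, checked by counting up to the integer square root.
import Mathlib
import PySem

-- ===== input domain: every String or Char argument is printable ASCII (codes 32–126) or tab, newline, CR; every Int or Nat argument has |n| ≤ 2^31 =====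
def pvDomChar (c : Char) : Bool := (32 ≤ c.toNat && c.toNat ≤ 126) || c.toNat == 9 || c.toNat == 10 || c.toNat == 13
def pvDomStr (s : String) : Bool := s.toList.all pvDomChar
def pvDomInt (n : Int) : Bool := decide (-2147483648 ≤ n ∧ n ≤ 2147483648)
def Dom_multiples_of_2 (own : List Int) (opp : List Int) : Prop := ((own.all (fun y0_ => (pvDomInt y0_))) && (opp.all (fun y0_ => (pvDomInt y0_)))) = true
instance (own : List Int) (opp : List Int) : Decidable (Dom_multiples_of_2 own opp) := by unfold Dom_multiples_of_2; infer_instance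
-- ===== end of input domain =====

-- B replaces A's O(n) construction of the whole False/True block list by the
-- O(sqrt n) closed-form test "n+2 is a perfect square" (faster, asymptotic).

-- ===== PORT A =====
-- the while loop of alternating_booleans: result grows until its length reaches `length`
def altLoop (length : Nat) (result : List Bool) (false_block : Nat) : List Bool :=
  if result.length < length then
    altLoop length ((result ++ List.replicate false_block false) ++ List.replicate 1 true)
      (false_block + 2)
  else result
termination_by length - result.length
decreasing_by simp; omega

def multiples_of_2 (own : List Int) (opp : List Int) : Bool :=
  -- alternating_booleans(length+1)[-1]; the slice result[:length] is List.take,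
  -- [-1] via pyGet? (always in range here, getD false is never taken)
  let length := own.length
  let result := altLoop (length + 1) [] 2
  ((PySem.List.pyGet? (result.take (length + 1)) (-1)).getD false)

-- ===== PORT B =====
-- the while loop of B: count r up until r*r >= m
def isqLoop (m r : Nat) : Bool :=
  if r * r < m then isqLoop m (r + 1) else r * r == m
termination_by m - r * r
decreasing_by
  have h2 : r * r < (r + 1) * (r + 1) := by nlinarith
  omega

def multiples_of_2_alt (own : List Int) (opp : List Int) : Bool :=
  isqLoop (own.length + 2) 0

-- ===== PRECONDITION & SPEC =====
def Spec_multiples_of_2 (own : List Int) (opp : List Int) (out : Bool) : Prop := out = multiples_of_2_alt own opp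
instance (own : List Int) (opp : List Int) (out : Bool) : Decidable (Spec_multiples_of_2 own opp out) := by unfold Spec_multiples_of_2; infer_instance

-- ===== CLAIM (what is proved, stated in full; the proofs are below) =====
def Claim_equal_multiples_of_2 : Prop := ∀ (own : List Int) (opp : List Int), Dom_multiples_of_2 own opp → Spec_multiples_of_2 own opp (multiples_of_2 own opp)

-- ===== LEMMAS AND PROOFS =====

-- B's loop decides "m is a perfect square", given that no s < r is a root yet
lemma isqLoop_spec (m r : Nat) (h : ∀ s, s < r → s * s < m) :
    isqLoop m r = true ↔ ∃ s : Nat, s * s = m := by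
  rw [isqLoop]
  split
  · next hlt =>
    refine isqLoop_spec m (r + 1) (fun s hs => ?_)
    rcases Nat.lt_succ_iff_lt_or_eq.mp hs with h' | h'
    · exact h s h'
    · simpa [h'] using hlt
  · next hge =>
    push_neg at hge
    simp only [beq_iff_eq]
    constructor
    · intro he; exact ⟨r, he⟩
    · rintro ⟨s, rfl⟩
      by_cases hsr : s < r
      · exact absurd (h s hsr) (by omega)
      · have h1 : r ≤ s := Nat.le_of_not_lt hsr
        have h2 := Nat.mul_le_mul h1 h1
        omega
termination_by m - r * r
decreasing_by
  have h2 : r * r < (r + 1) * (r + 1) := by nlinarith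
  omega

-- A's loop: invariant after k completed groups
lemma altLoop_spec (len k : Nat) (result : List Bool)
    (hlen : result.length = k * (k + 2))
    (hres : ∀ i, i < result.length → (result.getD i false = true ↔ ∃ s : Nat, s * s = i + 2)) :
    len ≤ (altLoop len result (2 * k + 2)).length ∧
      ∀ i, i < len →
        ((altLoop len result (2 * k + 2)).getD i false = true ↔ ∃ s : Nat, s * s = i + 2) := by
  rw [altLoop]
  split
  · next hlt =>
    have e : 2 * k + 2 + 2 = 2 * (k + 1) + 2 := by ring
    rw [e]
    refine altLoop_spec len (k + 1)
      ((result ++ List.replicate (2 * k + 2) false) ++ List.replicate 1 true) ?_ ?_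
    · simp [hlen]; ring
    · intro i hi
      simp only [List.length_append, List.length_replicate, hlen] at hi
      by_cases h1 : i < result.length
      · rw [List.getD_append _ _ _ _ (by simp; omega), List.getD_append _ _ _ _ h1]
        exact hres i h1
      · push_neg at h1
        by_cases h2 : i < result.length + (2 * k + 2)
        · -- inside the new false block: (k+1)^2 < i+2 < (k+2)^2, not a square
          rw [List.getD_append _ _ _ _ (by simp; omega),
            List.getD_append_right _ _ _ _ (by omega)]
          simp only [List.getD_replicate _ (by omega : i - result.length < 2 * k + 2)]
          simp only [Bool.false_eq_true, false_iff]
          rintro ⟨s, hs⟩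
          rcases Nat.lt_or_ge s (k + 2) with hc | hc
          · have : s ≤ k + 1 := by omega
            have := Nat.mul_le_mul this this
            nlinarith [hlen, h1]
          · have := Nat.mul_le_mul hc hc
            nlinarith [hlen, h2]
        · -- the trailing True: i + 2 = (k+2)^2
          have hieq : i = result.length + (2 * k + 2) := by omega
          have hle : (result ++ List.replicate (2 * k + 2) false).length ≤ i := by
            simp; omega
          rw [List.getD_append_right _ _ _ _ hle]
          simp only [List.length_append, List.length_replicate]
          have : i - (result.length + (2 * k + 2)) = 0 := by omega
          rw [this]
          simp only [List.getD_replicate _ (by omega : 0 < 1), true_iff]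
          exact ⟨k + 2, by nlinarith [hlen]⟩
  · next hge =>
    push_neg at hge
    exact ⟨hge, fun i hi => hres i (by omega)⟩
termination_by len - result.length
decreasing_by
  simp only [List.length_append, List.length_replicate]
  omega

-- ===== VERDICT (by name: the statement is the Claim_ definition above) =====
theorem multiples_of_2_spec : Claim_equal_multiples_of_2 := by
  intro own opp _
  unfold Spec_multiples_of_2 multiples_of_2 multiples_of_2_alt
  simp only []
  set n := own.length with hn
  have H := altLoop_spec (n + 1) 0 [] (by simp) (by simp)
  norm_num at H
  obtain ⟨hlen, hchar⟩ := H
  set L := altLoop (n + 1) [] 2 with hL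
  have htake : (L.take (n + 1)).length = n + 1 := by
    simp [List.length_take]; omega
  have hget : PySem.List.pyGet? (L.take (n + 1)) (-1) = (L.take (n + 1))[n]? := by
    rw [PySem.List.pyGet?_neg_one, List.getLast?_eq_getElem?, htake]
    norm_num
  rw [hget, List.getElem?_take_of_lt (by omega)]
  have hA : (L[n]?.getD false = true) ↔ ∃ s : Nat, s * s = n + 2 := by
    rw [← List.getD_eq_getElem?_getD]
    exact hchar n (by omega)
  have hB : (isqLoop (n + 2) 0 = true) ↔ ∃ s : Nat, s * s = n + 2 :=
    isqLoop_spec (n + 2) 0 (fun s hs => absurd hs (by omega))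
  rw [Bool.eq_iff_iff]
  exact hA.trans hB.symm
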